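-- pv_equiv track=rewrite | github.com/daun-up/algorithm | 백준/Gold/13913. 숨바꼭질 4/숨바꼭질 4.py | bfs
-- ===== SOURCE A (Python) =====
-- from collections import deque
--
-- def bfs(s,e) :
--     v = [0] * 200001
--     q = deque()
--     q.append(s)
--     v[s] = 1
--     path = {} # 경로 추적용 딕셔너리
--     while q :
--         c = q.popleft() # 큐에서 현재 위치를 꺼내서 확인
--         if c == e : # 목표 위치에 도착 -> 경로 복원
--             route = []
--             while c != s :
--                 route.append(c)
--                 c = path[c] # path[c] 를 따라 거슬러 올라가며 경로를 복원함
--             route.append(s)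
--             route.reverse() # 출발점 -> 도착점 순서로 변경
--             return v[e] - 1, route
--
--         for n in (c-1, c+1, c*2) :
--             if 0 <= n <= 200000 and v[n] == 0 :
--                 q.append(n)
--                 v[n] = v[c] + 1
--                 path[n] = c  # 경로 저장
-- ===== SOURCE B (Python) =====
-- def bfs(s, e):
--     # Level-synchronous BFS: frontier list per distance level d, boolean visited
--     # array, parent dict for route reconstruction.
--     visited = [False] * 200001
--     visited[s] = True
--     parent = {}
--     frontier = [s]
--     d = 0
--     while frontier:
--         nxt = []
--         for c in frontier:
--             if c == e:
--                 route = []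
--                 while c != s:
--                     route.append(c)
--                     c = parent[c]
--                 route.append(s)
--                 return d, route[::-1]
--             for n in (c - 1, c + 1, c * 2):
--                 if 0 <= n <= 200000 and not visited[n]:
--                     visited[n] = True
--                     parent[n] = c
--                     nxt.append(n)
--         frontier = nxt
--         d += 1
-- ===== Notes on version B (the rewrite author's own statement) =====
-- stated objective: alternative
-- what changed: The deque-driven BFS (one queue, distance array v holding level+1) is re-decomposed as a level-synchronous BFS: a frontier list per distance level, a boolean visited array, an explicit level counter returned directly instead of v[e]-1, with an inner per-level scan building the next frontier.
-- outside the precondition, e.g. on bfs(-1, 5): A returns (5, [-1, 0, 1, 2, 4, 5]), B returns (5, [-1, 0, 1, 2, 4, 5])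
import Mathlib
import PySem

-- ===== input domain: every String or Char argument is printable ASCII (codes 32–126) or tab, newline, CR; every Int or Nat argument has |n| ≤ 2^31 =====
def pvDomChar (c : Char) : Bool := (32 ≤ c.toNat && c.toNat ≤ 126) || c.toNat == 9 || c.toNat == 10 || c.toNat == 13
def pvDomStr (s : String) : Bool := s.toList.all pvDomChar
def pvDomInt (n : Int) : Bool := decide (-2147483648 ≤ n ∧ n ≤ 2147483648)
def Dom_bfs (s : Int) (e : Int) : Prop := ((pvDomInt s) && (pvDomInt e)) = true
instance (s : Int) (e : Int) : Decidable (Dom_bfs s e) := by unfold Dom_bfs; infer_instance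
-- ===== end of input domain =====

-- B re-implements A's deque BFS as a level-synchronous BFS (frontier list per
-- distance level + boolean visited array + level counter) — alternative
-- decomposition, same O(V) cost; return values proved equal on Pre_bfs.
-- Port conventions shared by both sides: Python's O(1) list indexing/assignment
-- is Array get/set, dict is Std.HashMap, deque append / list append / the
-- append-then-reverse route loop use the standard cons-accumulator encodings.

-- shared array-indexing helpers (Python `v[i]` read / `v[i] = x` write for the
-- indices 0 ≤ i < len(v) that the guarded accesses reach inside Pre_bfs)
def vget (v : Array Int) (n : Int) : Int := v.getD n.toNat 0
def vset (v : Array Int) (n : Int) (x : Int) : Array Int := v.setIfInBounds n.toNat x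
def bget (v : Array Bool) (n : Int) : Bool := v.getD n.toNat false
def bset (v : Array Bool) (n : Int) (x : Bool) : Array Bool := v.setIfInBounds n.toNat x

-- ===== PORT A =====
-- body of A's `for n in (c-1, c+1, c*2)` loop: state (rear of the deque held
-- reversed for O(1) append, distance array v, path dict)
def stepA (c : Int) (st : List Int × Array Int × Std.HashMap Int Int) (n : Int) :
    List Int × Array Int × Std.HashMap Int Int :=
  if (0 ≤ n ∧ n ≤ 200000) ∧ vget st.2.1 n = 0 then
    (n :: st.1, vset st.2.1 n (vget st.2.1 c + 1), st.2.2.insert n c)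
  else st

-- A's `while c != s: route.append(c); c = path[c]` followed by append s and
-- reverse: the route is accumulated by consing, which yields it already reversed
-- (fuel-bounded; inside Pre_ the parent chain reaches s within 400002 steps)
def routeA (fuel : Nat) (c s : Int) (path : Std.HashMap Int Int) (acc : List Int) : List Int :=
  match fuel with
  | 0 => acc
  | f + 1 => if c = s then acc else routeA f ((path.get? c).getD c) s path (c :: acc)

-- A's `while q` loop over the two-list FIFO queue (front, rear-reversed), one
-- fuel per dequeue (inside Pre_ at most 200001 dequeues happen)
def loopA (s e : Int) : Nat → List Int → List Int → Array Int → Std.HashMap Int Int →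
    Option (Int × List Int)
  | 0, _, _, _, _ => none
  | f + 1, c :: q, back, v, path =>
    if c = e then some (vget v e - 1, s :: routeA 400002 c s path [])
    else
      let st := [c - 1, c + 1, c * 2].foldl (stepA c) (back, v, path)
      loopA s e f q st.1 st.2.1 st.2.2
  | f + 1, [], back, v, path =>
    match back.reverse with
    | [] => none
    | c :: q =>
      if c = e then some (vget v e - 1, s :: routeA 400002 c s path [])
      else
        let st := [c - 1, c + 1, c * 2].foldl (stepA c) ([], v, path)
        loopA s e f q st.1 st.2.1 st.2.2

def bfs (s : Int) (e : Int) : Int × List Int :=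
  (loopA s e 300000 [s] [] (vset (Array.replicate 200001 (0 : Int)) s 1)
    Std.HashMap.emptyWithCapacity).getD (0, [])

-- ===== PORT B =====
-- body of B's `for n in (c-1, c+1, c*2)` loop: state (next-frontier accumulator
-- held reversed for O(1) append, visited array, parent dict)
def stepB (c : Int) (st : List Int × Array Bool × Std.HashMap Int Int) (n : Int) :
    List Int × Array Bool × Std.HashMap Int Int :=
  if (0 ≤ n ∧ n ≤ 200000) ∧ ¬(bget st.2.1 n = true) then
    (n :: st.1, bset st.2.1 n true, st.2.2.insert n c)
  else st

-- B's route reconstruction (`while c != s: route.append(c); c = parent[c]` then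
-- append s and route[::-1]: consing yields the reversed route directly)
def routeB (fuel : Nat) (c s : Int) (par : Std.HashMap Int Int) (acc : List Int) : List Int :=
  match fuel with
  | 0 => acc
  | f + 1 => if c = s then acc else routeB f ((par.get? c).getD c) s par (c :: acc)

-- B's `for c in frontier` scan of one level: returns the answer if e is reached,
-- otherwise the next frontier (reversed accumulator) with visited and parent
def scanB (e s d : Int) : List Int → List Int → Array Bool → Std.HashMap Int Int →
    (Int × List Int) ⊕ (List Int × Array Bool × Std.HashMap Int Int)
  | [], acc, vis, par => .inr (acc, vis, par)
  | c :: rest, acc, vis, par =>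
    if c = e then .inl (d, s :: routeB 400002 c s par [])
    else
      let st := [c - 1, c + 1, c * 2].foldl (stepB c) (acc, vis, par)
      scanB e s d rest st.1 st.2.1 st.2.2

-- B's `while frontier` loop, one fuel per level (inside Pre_ at most 200001 levels)
def loopB (e s : Int) : Nat → List Int → Array Bool → Int → Std.HashMap Int Int →
    Option (Int × List Int)
  | 0, _, _, _, _ => none
  | f + 1, frontier, vis, d, par =>
    match frontier with
    | [] => none
    | c :: rest =>
      match scanB e s d (c :: rest) [] vis par with
      | .inl r => some r
      | .inr (acc, vis', par') => loopB e s f acc.reverse vis' (d + 1) par'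

def bfs_alt (s : Int) (e : Int) : Int × List Int :=
  (loopB e s 300000 [s] (bset (Array.replicate 200001 false) s true) 0
    Std.HashMap.emptyWithCapacity).getD (0, [])

-- ===== PRECONDITION & SPEC =====
-- Pre_bfs excludes inputs outside the board 0..200000: there A raises IndexError
-- (|s| beyond the array) or returns None instead of a pair (e unreachable), and for
-- s = -1 the value A returns is an artefact of Python negative-index wraparound.
def Pre_bfs (s : Int) (e : Int) : Prop := 0 ≤ s ∧ s ≤ 200000 ∧ 0 ≤ e ∧ e ≤ 200000
instance (s : Int) (e : Int) : Decidable (Pre_bfs s e) := by unfold Pre_bfs; infer_instance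
def pvWitness_bfs : Int × Int := (5, 17)

def Spec_bfs (s : Int) (e : Int) (out : Int × List Int) : Prop := out = bfs_alt s e
instance (s : Int) (e : Int) (out : Int × List Int) : Decidable (Spec_bfs s e out) := by
  unfold Spec_bfs; infer_instance

-- ===== CLAIM (what is proved, stated in full; the proofs are below) =====
def Claim_equal_bfs : Prop := ∀ (s : Int) (e : Int), Dom_bfs s e → Pre_bfs s e → Spec_bfs s e (bfs s e)

-- ===== LEMMAS AND PROOFS =====

-- B's visited array as the image of A's distance array; zcount = unvisited cells
def vmap (v : Array Int) : Array Bool := v.map (fun a => a != 0)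
def zcount (v : Array Int) : Nat := v.toList.countP (fun a => a == 0)

theorem vmap_toList (v : Array Int) :
    (vmap v).toList = v.toList.map (fun a => a != 0) := by
  simp [vmap, Array.toList_map]

-- toList bridges for the four indexing helpers
theorem vget_toList (v : Array Int) (n : Int) : vget v n = v.toList.getD n.toNat 0 := by
  unfold vget Array.getD
  split <;> simp [List.getD_eq_getElem?_getD, *]

theorem bget_toList (v : Array Bool) (n : Int) : bget v n = v.toList.getD n.toNat false := by
  unfold bget Array.getD
  split <;> simp [List.getD_eq_getElem?_getD, *]

theorem vset_toList (v : Array Int) (n : Int) (x : Int) :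
    (vset v n x).toList = v.toList.set n.toNat x := by
  simp [vset, Array.toList_setIfInBounds]

theorem bset_toList (v : Array Bool) (n : Int) (x : Bool) :
    (bset v n x).toList = v.toList.set n.toNat x := by
  simp [bset, Array.toList_setIfInBounds]

theorem size_vset (v : Array Int) (n : Int) (x : Int) : (vset v n x).size = v.size := by
  simp [vset, Array.size_setIfInBounds]

-- list-level elementary facts
theorem getD_map_ne (l : List Int) (k : Nat) :
    (l.map (fun a => a != 0)).getD k false = ((l.getD k 0) != 0) := by
  induction l generalizing k with
  | nil => simp
  | cons a t ih =>
    cases k with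
    | zero => simp
    | succ m => simpa using ih m

theorem getD_set_self' (v : List Int) (k : Nat) (h : k < v.length) (x : Int) :
    (v.set k x).getD k 0 = x := by
  simp [List.getD_eq_getElem?_getD, h]

theorem getD_set_ne' (v : List Int) (k j : Nat) (h : k ≠ j) (x : Int) :
    (v.set k x).getD j 0 = v.getD j 0 := by
  simp [List.getD_eq_getElem?_getD, List.getElem?_set_ne h]

theorem countP_set_zero (v : List Int) (k : Nat) (x : Int) (hk : k < v.length)
    (h0 : v.getD k 0 = 0) (hx : x ≠ 0) :
    v.countP (fun a => a == 0) = (v.set k x).countP (fun a => a == 0) + 1 := by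
  induction v generalizing k with
  | nil => simp at hk
  | cons a t ih =>
    cases k with
    | zero =>
      simp only [List.getD_cons_zero] at h0
      simp [List.set_cons_zero, h0, hx]
    | succ m =>
      simp only [List.getD_cons_succ] at h0
      simp only [List.length_cons, Nat.succ_lt_succ_iff] at hk
      have := ih m hk h0
      simp only [List.set_cons_succ, List.countP_cons] at *
      omega

theorem countP_zero_replicate (n : Nat) :
    (List.replicate n (0 : Int)).countP (fun a => a == 0) = n := by
  induction n with
  | zero => rfl
  | succ m ih => rw [List.replicate_succ, List.countP_cons]; simp [ih]

-- array-level elementary facts, phrased with the helpers the ports use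
theorem getD_vmap (v : Array Int) (n : Int) : bget (vmap v) n = ((vget v n) != 0) := by
  rw [bget_toList, vget_toList, vmap_toList]
  exact getD_map_ne v.toList n.toNat

theorem vget_vset_self (v : Array Int) (n : Int) (x : Int) (h : n.toNat < v.size) :
    vget (vset v n x) n = x := by
  rw [vget_toList, vset_toList]
  exact getD_set_self' v.toList n.toNat (by rw [Array.length_toList]; exact h) x

theorem vget_vset_ne (v : Array Int) (n m : Int) (x : Int) (h : n.toNat ≠ m.toNat) :
    vget (vset v n x) m = vget v m := by
  rw [vget_toList, vget_toList, vset_toList]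
  exact getD_set_ne' v.toList n.toNat m.toNat h x

theorem zcount_set (v : Array Int) (n : Int) (x : Int) (hk : n.toNat < v.size)
    (h0 : vget v n = 0) (hx : x ≠ 0) : zcount v = zcount (vset v n x) + 1 := by
  unfold zcount
  rw [vset_toList]
  exact countP_set_zero v.toList n.toNat x (by rw [Array.length_toList]; exact hk)
    (by rw [vget_toList] at h0; exact h0) hx

theorem vmap_vset (v : Array Int) (n : Int) (x : Int) (hx : x ≠ 0) :
    bset (vmap v) n true = vmap (vset v n x) := by
  apply Array.ext'
  rw [bset_toList, vmap_toList, vmap_toList, vset_toList, List.map_set]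
  have hxt : (x != 0) = true := by simpa using hx
  rw [hxt]

theorem routeB_eq_routeA (fuel : Nat) :
    ∀ (c s : Int) (p : Std.HashMap Int Int) (r : List Int),
      routeB fuel c s p r = routeA fuel c s p r := by
  induction fuel with
  | zero => intro c s p r; rfl
  | succ f ih =>
    intro c s p r
    simp only [routeA, routeB]
    split
    · rfl
    · exact ih _ _ _ _

-- dequeuing from an empty front flips the rear of the two-list queue
theorem loopA_flip (s e : Int) (f : Nat) (back : List Int) (v : Array Int)
    (path : Std.HashMap Int Int) :
    loopA s e f [] back v path = loopA s e f back.reverse [] v path := by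
  cases f with
  | zero => rfl
  | succ f =>
    cases hb : back.reverse with
    | nil => simp [loopA, hb]
    | cons c q => simp [loopA, hb]

theorem loopA_nil_nil (s e : Int) (f : Nat) (v : Array Int) (path : Std.HashMap Int Int) :
    loopA s e f [] [] v path = none := by
  cases f <;> rfl

-- one level's per-node neighbour fold: A on the queue rear and B on the frontier
-- accumulator perform identical pushes, discovering the same new nodes
theorem fold_sim (c d : Int) (hd : 0 ≤ d) (ns : List Int) :
    ∀ (acc : List Int) (v : Array Int) (path : Std.HashMap Int Int),
      v.size = 200001 → vget v c = d + 1 →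
      ∃ nx v₂ path₂,
        ns.foldl (stepA c) (acc, v, path) = (nx ++ acc, v₂, path₂) ∧
        ns.foldl (stepB c) (acc, vmap v, path) = (nx ++ acc, vmap v₂, path₂) ∧
        v₂.size = 200001 ∧
        (∀ x : Int, vget v x ≠ 0 → vget v₂ x = vget v x) ∧
        (∀ x ∈ nx, (0 ≤ x ∧ x ≤ 200000) ∧ vget v₂ x = d + 2) ∧
        zcount v = zcount v₂ + nx.length := by
  induction ns with
  | nil =>
    intro acc v path hlen hc
    exact ⟨[], v, path, by simp, by simp, hlen, fun x _ => rfl, by simp, by simp⟩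
  | cons n ns ih =>
    intro acc v path hlen hc
    by_cases hg : (0 ≤ n ∧ n ≤ 200000) ∧ vget v n = 0
    · -- the neighbour is on the board and unvisited: both sides mark and push it
      have hnlt : n.toNat < v.size := by omega
      have hne0 : (d + 2 : Int) ≠ 0 := by omega
      have hA : stepA c (acc, v, path) n =
          (n :: acc, vset v n (d + 2), path.insert n c) := by
        have h2 : vget v c + 1 = d + 2 := by omega
        simp [stepA, hg.1.1, hg.1.2, hg.2, h2]
      have hB : stepB c (acc, vmap v, path) n =
          (n :: acc, bset (vmap v) n true, path.insert n c) := by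
        have : bget (vmap v) n = false := by
          rw [getD_vmap, hg.2]; rfl
        simp [stepB, hg.1.1, hg.1.2, this]
      have hvm : bset (vmap v) n true = vmap (vset v n (d + 2)) := vmap_vset v n _ hne0
      have hc' : vget (vset v n (d + 2)) c = d + 1 := by
        have hneq : n.toNat ≠ c.toNat := by
          intro h
          have hnc : vget v n = vget v c := by unfold vget; rw [h]
          omega
        rw [vget_vset_ne v n c _ hneq]
        exact hc
      obtain ⟨nx, v₂, path₂, hA2, hB2, hlen2, hpres, hnew, hz⟩ :=
        ih (n :: acc) (vset v n (d + 2)) (path.insert n c)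
          (by rw [size_vset]; exact hlen) hc'
      refine ⟨nx ++ [n], v₂, path₂, ?_, ?_, hlen2, ?_, ?_, ?_⟩
      · rw [List.foldl_cons, hA, hA2]; simp
      · rw [List.foldl_cons, hB, hvm, hB2]; simp
      · intro x hx
        have hneq : n.toNat ≠ x.toNat := by
          intro h
          have h0 : vget v n = vget v x := by unfold vget; rw [h]
          exact hx (by rw [← h0]; exact hg.2)
        have hset : vget (vset v n (d + 2)) x = vget v x := vget_vset_ne v n x _ hneq
        exact (hpres x (by rw [hset]; exact hx)).trans hset
      · intro x hx
        rcases List.mem_append.mp hx with hx' | hx'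
        · exact hnew x hx'
        · rw [List.mem_singleton] at hx'
          subst hx'
          refine ⟨hg.1, ?_⟩
          have hv' : vget (vset v x (d + 2)) x = d + 2 := vget_vset_self v x _ hnlt
          rw [← hv']
          exact hpres x (by rw [hv']; exact hne0)
      · have hzs : zcount v = zcount (vset v n (d + 2)) + 1 :=
          zcount_set v n (d + 2) hnlt hg.2 hne0
        simp only [List.length_append, List.length_singleton]
        omega
    · -- skipped neighbour: both steps leave the state unchanged
      have hA : stepA c (acc, v, path) n = (acc, v, path) := by
        simp [stepA, hg]
      have hnc : ¬((0 ≤ n ∧ n ≤ 200000) ∧ ¬ bget (vmap v) n = true) := by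
        intro hh
        rw [getD_vmap] at hh
        exact hg ⟨hh.1, by simpa using hh.2⟩
      have hB : stepB c (acc, vmap v, path) n = (acc, vmap v, path) := by
        simp only [stepB]
        rw [if_neg hnc]
      rw [List.foldl_cons, hA, List.foldl_cons, hB]
      exact ih acc v path hlen hc

-- scanning one frontier level equals running A's queue loop over that level
theorem scan_sim (s e d : Int) (hd : 0 ≤ d) :
    ∀ (cur acc : List Int) (v : Array Int) (path : Std.HashMap Int Int) (fa : Nat),
      v.size = 200001 →
      (∀ x ∈ cur, (0 ≤ x ∧ x ≤ 200000) ∧ vget v x = d + 1) →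
      (∀ x ∈ acc, (0 ≤ x ∧ x ≤ 200000) ∧ vget v x = d + 2) →
      (match scanB e s d cur acc (vmap v) path with
       | .inl r => loopA s e (fa + cur.length) cur acc v path = some r
       | .inr (acc₂, vis₂, path₂) =>
         ∃ v₂, vis₂ = vmap v₂ ∧
           loopA s e (fa + cur.length) cur acc v path = loopA s e fa [] acc₂ v₂ path₂ ∧
           v₂.size = 200001 ∧
           (∀ x ∈ acc₂, (0 ≤ x ∧ x ≤ 200000) ∧ vget v₂ x = d + 2) ∧
           zcount v + acc.length = zcount v₂ + acc₂.length) := by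
  intro cur
  induction cur with
  | nil =>
    intro acc v path fa hlen hcur hacc
    simp only [scanB]
    exact ⟨v, rfl, rfl, hlen, hacc, rfl⟩
  | cons c rest ih =>
    intro acc v path fa hlen hcur hacc
    have hc := hcur c (List.mem_cons_self)
    have hfa : fa + (c :: rest).length = (fa + rest.length) + 1 := by
      simp [List.length_cons]; omega
    by_cases hce : c = e
    · -- target reached: A returns v[e]-1, B returns the level counter d; equal by the invariant
      have hAeq : loopA s e (fa + (c :: rest).length) (c :: rest) acc v path =
          some (vget v e - 1, s :: routeA 400002 c s path []) := by
        rw [hfa]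
        simp only [loopA]
        rw [if_pos hce]
      simp only [scanB]
      rw [if_pos hce]
      simp only []
      rw [hAeq, routeB_eq_routeA]
      have : vget v e - 1 = d := by rw [← hce, hc.2]; ring
      rw [this]
    · -- expand c's three neighbours, then recurse over the rest of the level
      obtain ⟨nx, v₂, path₂, hA2, hB2, hlen2, hpres, hnew, hz⟩ :=
        fold_sim c d hd [c - 1, c + 1, c * 2] acc v path hlen hc.2
      have hAstep : loopA s e (fa + (c :: rest).length) (c :: rest) acc v path =
          loopA s e (fa + rest.length) rest (nx ++ acc) v₂ path₂ := by
        rw [hfa]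
        simp only [loopA]
        rw [if_neg hce]
        simp only [hA2]
      have hBstep : scanB e s d (c :: rest) acc (vmap v) path =
          scanB e s d rest (nx ++ acc) (vmap v₂) path₂ := by
        simp only [scanB]
        rw [if_neg hce]
        simp only [hB2]
      have hrest : ∀ x ∈ rest, (0 ≤ x ∧ x ≤ 200000) ∧ vget v₂ x = d + 1 := by
        intro x hx
        have h := hcur x (List.mem_cons_of_mem _ hx)
        exact ⟨h.1, by rw [hpres x (by rw [h.2]; omega)]; exact h.2⟩
      have hacc' : ∀ x ∈ nx ++ acc, (0 ≤ x ∧ x ≤ 200000) ∧ vget v₂ x = d + 2 := by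
        intro x hx
        rcases List.mem_append.mp hx with hx' | hx'
        · exact hnew x hx'
        · have h := hacc x hx'
          exact ⟨h.1, by rw [hpres x (by rw [h.2]; omega)]; exact h.2⟩
      have hIH := ih (nx ++ acc) v₂ path₂ fa hlen2 hrest hacc'
      rw [hBstep, hAstep]
      revert hIH
      cases hscan : scanB e s d rest (nx ++ acc) (vmap v₂) path₂ with
      | inl r => intro hIH; exact hIH
      | inr st =>
        obtain ⟨acc₂, vis₂, path₃⟩ := st
        intro hIH
        obtain ⟨v₃, hvis, hloop, hlen3, hinv, hz3⟩ := hIH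
        refine ⟨v₃, hvis, hloop, hlen3, hinv, ?_⟩
        simp only [List.length_append] at hz3 ⊢
        omega

-- the two whole loops agree whenever both have enough fuel left
theorem loop_sim (s e : Int) :
    ∀ (fb fa : Nat) (d : Int) (cur : List Int) (v : Array Int) (path : Std.HashMap Int Int),
      0 ≤ d → v.size = 200001 →
      (∀ x ∈ cur, (0 ≤ x ∧ x ≤ 200000) ∧ vget v x = d + 1) →
      zcount v + cur.length + 1 ≤ fa → zcount v + 2 ≤ fb →
      loopB e s fb cur (vmap v) d path = loopA s e fa cur [] v path := by
  intro fb
  induction fb with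
  | zero => intro fa d cur v path _ _ _ _ hfb; omega
  | succ fb ih =>
    intro fa d cur v path hd hlen hcur hfa hfb
    cases cur with
    | nil =>
      rw [loopA_nil_nil]
      rfl
    | cons c rest =>
      obtain ⟨fa', hfa'⟩ : ∃ fa', fa = fa' + (c :: rest).length := by
        refine ⟨fa - (c :: rest).length, ?_⟩
        simp only [List.length_cons] at *
        omega
      have hsim := scan_sim s e d hd (c :: rest) [] v path fa' hlen hcur (by simp)
      simp only [loopB]
      revert hsim
      cases hscan : scanB e s d (c :: rest) [] (vmap v) path with
      | inl r =>
        intro hsim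
        rw [hfa']
        exact hsim.symm
      | inr st =>
        obtain ⟨acc₂, vis₂, path₂⟩ := st
        intro hsim
        obtain ⟨v₂, hvis, hloop, hlen2, hinv, hz⟩ := hsim
        subst hvis
        rw [hfa', hloop]
        cases hacc : acc₂ with
        | nil =>
          subst hacc
          rw [loopA_nil_nil]
          show loopB e s fb [] (vmap v₂) (d + 1) path₂ = none
          obtain ⟨fb', rfl⟩ : ∃ k, fb = k + 1 := ⟨fb - 1, by omega⟩
          rfl
        | cons y ys =>
          subst hacc
          rw [loopA_flip]
          show loopB e s fb ((y :: ys).reverse) (vmap v₂) (d + 1) path₂ =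
            loopA s e fa' ((y :: ys).reverse) [] v₂ path₂
          have hlen' : (y :: ys).reverse.length = (y :: ys).length := List.length_reverse
          refine ih fa' (d + 1) (y :: ys).reverse v₂ path₂ (by omega) hlen2 ?_ ?_ ?_
          · intro x hx
            rw [List.mem_reverse] at hx
            have h := hinv x hx
            exact ⟨h.1, by rw [h.2]; ring⟩
          · simp only [List.length_nil] at hz
            rw [hlen']
            omega
          · simp only [List.length_nil] at hz
            simp only [List.length_cons] at *
            omega

-- ===== VERDICT (by name: the statement is the Claim_ definition above) =====
theorem bfs_spec : Claim_equal_bfs := by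
  intro s e _ hpre
  obtain ⟨hs0, hs1, he0, he1⟩ := hpre
  unfold Spec_bfs bfs bfs_alt
  have hslt : s.toNat < 200001 := by omega
  have hslt' : s.toNat < (Array.replicate 200001 (0 : Int)).size := by
    rw [Array.size_replicate]; exact hslt
  have hv0len : (vset (Array.replicate 200001 (0 : Int)) s 1).size = 200001 := by
    rw [size_vset, Array.size_replicate]
  have hrep : vmap (Array.replicate 200001 (0 : Int)) = Array.replicate 200001 false := by
    apply Array.ext'
    rw [vmap_toList, Array.toList_replicate, Array.toList_replicate, List.map_replicate]
    rfl
  have hvis : bset (Array.replicate 200001 false) s true =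
      vmap (vset (Array.replicate 200001 (0 : Int)) s 1) := by
    rw [← vmap_vset _ _ _ one_ne_zero, hrep]
  have hgets : vget (vset (Array.replicate 200001 (0 : Int)) s 1) s = 1 :=
    vget_vset_self _ _ _ hslt'
  have hz0 : zcount (vset (Array.replicate 200001 (0 : Int)) s 1) = 200000 := by
    have h1 : zcount (Array.replicate 200001 (0 : Int)) =
        zcount (vset (Array.replicate 200001 (0 : Int)) s 1) + 1 :=
      zcount_set _ _ _ hslt'
        (by rw [vget_toList, Array.toList_replicate, List.getD_replicate]; exact hslt)
        one_ne_zero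
    rw [show zcount (Array.replicate 200001 (0 : Int)) = 200001 from by
      unfold zcount; rw [Array.toList_replicate]; exact countP_zero_replicate 200001] at h1
    omega
  have hmain := loop_sim s e 300000 300000 0 [s]
    (vset (Array.replicate 200001 (0 : Int)) s 1) Std.HashMap.emptyWithCapacity
    (le_refl 0) hv0len
    (by
      intro x hx
      rw [List.mem_singleton] at hx
      subst hx
      exact ⟨⟨hs0, hs1⟩, by rw [hgets]; norm_num⟩)
    (by rw [hz0, List.length_singleton]; omega) (by rw [hz0]; omega)
  rw [hvis, hmain]
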